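-- pv_equiv track=rewrite | github.com/hac-ohmygod0193/nycu-data-science-2024-spring | lab1/part1/111511198.py | binary_search_last_date
-- ===== SOURCE A (Python) =====
-- def binary_search_last_date(articles, target_date):
--     """
--     Perform binary search to find the index of the last article with a date <= target_date.
--
--     Args:
--         articles (list): List of articles sorted by date.
--         target_date (str): The target date to find.
--
--     Returns:
--         int: Index of the last article with a date <= target_date.
--     """
--     left, right = 0, len(articles) - 1
--     while left <= right:
--         mid = (left + right) // 2
--         if articles[mid]["date"] <= target_date:
--             if mid == len(articles) - 1 or articles[mid + 1]["date"] > target_date: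
--                 return mid
--             left = mid + 1
--         else:
--             right = mid - 1
--     return -1
-- ===== SOURCE B (Python) =====
-- def binary_search_last_date(articles, target_date):
--     """The list is sorted by date, so the index of the last article with
--     date <= target_date is simply (number of articles with date <= target_date) - 1;
--     count them in one linear pass (-1 falls out naturally when none qualify)."""
--     count = 0
--     for article in articles:
--         if article["date"] <= target_date:
--             count += 1
--     return count - 1
-- ===== Notes on version B (the rewrite author's own statement) =====
-- stated objective: simpler
-- what changed: Replaced A's binary search (interval halving with a neighbour peek and mid-loop returns) by a single linear counting pass: on a date-sorted list the last index with date <= target equals the count of such articles minus one.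
-- outside the precondition, e.g. on binary_search_last_date([{'date': 'b'}, {'date': 'a'}], 'a'): A returns -1, B returns 0; on binary_search_last_date([{'date': 'a'}, {'date': 'b'}, {}], 'a'): A returns 0, B raises KeyError
import Mathlib
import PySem

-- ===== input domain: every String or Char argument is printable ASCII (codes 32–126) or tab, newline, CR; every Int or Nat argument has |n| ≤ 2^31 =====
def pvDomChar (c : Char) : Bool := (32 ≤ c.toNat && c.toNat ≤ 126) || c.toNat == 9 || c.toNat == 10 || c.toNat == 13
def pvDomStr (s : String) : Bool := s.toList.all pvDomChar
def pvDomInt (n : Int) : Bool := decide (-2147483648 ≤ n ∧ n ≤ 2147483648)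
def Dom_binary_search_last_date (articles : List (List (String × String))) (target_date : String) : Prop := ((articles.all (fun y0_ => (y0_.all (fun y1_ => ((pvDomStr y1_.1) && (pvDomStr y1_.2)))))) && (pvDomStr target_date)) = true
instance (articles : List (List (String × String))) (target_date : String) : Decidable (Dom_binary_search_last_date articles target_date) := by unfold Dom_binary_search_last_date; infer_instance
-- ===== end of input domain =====

-- B replaces A's binary search by a single linear counting pass (count of dates ≤ target, minus one);
-- equal on sorted inputs whose articles all carry "date".


-- ===== PORT A =====
-- the while-loop of A; fuel bounds the iteration count (n+1 suffices); -2 marks the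
-- KeyError/IndexError cases Python raises on (excluded by Pre_)
def pvLoopA (articles : List (List (String × String))) (target_date : String)
    (left right : Int) : Nat → Int
  | 0 => -1
  | fuel + 1 =>
    if left ≤ right then
      let mid := PySem.Int.floordiv (left + right) 2
      match PySem.List.pyGet? articles mid with
      | none => -2
      | some art =>
        match art.lookup "date" with
        | none => -2
        | some d =>
          if d ≤ target_date then
            if mid = (articles.length : Int) - 1 then mid
            else
              match PySem.List.pyGet? articles (mid + 1) with
              | none => -2
              | some art2 =>
                match art2.lookup "date" with
                | none => -2
                | some d2 =>
                  if target_date < d2 then mid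
                  else pvLoopA articles target_date (mid + 1) right fuel
          else pvLoopA articles target_date left (mid - 1) fuel
    else -1

def binary_search_last_date (articles : List (List (String × String))) (target_date : String) : Int :=
  pvLoopA articles target_date 0 ((articles.length : Int) - 1) (articles.length + 1)

-- ===== PORT B =====
-- B's for-loop over the articles, accumulating the count; none = KeyError (excluded by Pre_)
def pvCountB (target_date : String) (count : Int) : List (List (String × String)) → Option Int
  | [] => some count
  | article :: rest =>
    match article.lookup "date" with
    | none => none
    | some d =>
      if d ≤ target_date then pvCountB target_date (count + 1) rest
      else pvCountB target_date count rest

def binary_search_last_date_alt (articles : List (List (String × String))) (target_date : String) : Int :=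
  match pvCountB target_date 0 articles with
  | none => -2
  | some count => count - 1

-- ===== PRECONDITION & SPEC =====
-- Pre_ excludes inputs where A raises (an article probed without a "date" key: KeyError) and
-- unsorted inputs, on which the value of a binary search is an artefact of its probe order —
-- the docstring requires "articles sorted by date".
def Pre_binary_search_last_date (articles : List (List (String × String))) (target_date : String) : Prop :=
  (∀ a ∈ articles, (a.lookup "date").isSome) ∧
  articles.Pairwise (fun x y =>
    ((x.lookup "date").getD "").toList ≤ ((y.lookup "date").getD "").toList)
instance (articles : List (List (String × String))) (target_date : String) : Decidable (Pre_binary_search_last_date articles target_date) := by unfold Pre_binary_search_last_date; infer_instance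

def pvWitness_binary_search_last_date : (List (List (String × String))) × String :=
  ([[("date", "2024-01-01")], [("date", "2024-02-02")]], "2024-01-15")

def Spec_binary_search_last_date (articles : List (List (String × String))) (target_date : String) (out : Int) : Prop := out = binary_search_last_date_alt articles target_date
instance (articles : List (List (String × String))) (target_date : String) (out : Int) : Decidable (Spec_binary_search_last_date articles target_date out) := by unfold Spec_binary_search_last_date; infer_instance

-- ===== CLAIM (what is proved, stated in full; the proofs are below) =====
def Claim_equal_binary_search_last_date : Prop := ∀ (articles : List (List (String × String))) (target_date : String), Dom_binary_search_last_date articles target_date → Pre_binary_search_last_date articles target_date → Spec_binary_search_last_date articles target_date (binary_search_last_date articles target_date)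

-- ===== LEMMAS AND PROOFS =====

-- date of article i (proof-side view; "" is never consulted under Pre_)
def pvDateAt (articles : List (List (String × String))) (i : Nat) : String :=
  ((articles.getD i []).lookup "date").getD ""

-- successful probe of index mid: the element and its date, as the ports see them
theorem pvProbe (articles : List (List (String × String)))
    (hkey : ∀ a ∈ articles, (a.lookup "date").isSome)
    (mid : Int) (h0 : 0 ≤ mid) (hn : mid < articles.length) :
    ∃ art, PySem.List.pyGet? articles mid = some art ∧
      art.lookup "date" = some (pvDateAt articles mid.toNat) := by
  have hm : mid.toNat < articles.length := by omega
  refine ⟨articles[mid.toNat], PySem.List.pyGet?_eq_some_getElem (xs := articles) h0 hn, ?_⟩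
  have := hkey articles[mid.toNat] (articles.getElem_mem hm)
  obtain ⟨d, hd⟩ := Option.isSome_iff_exists.mp this
  simp [pvDateAt, List.getD_eq_getElem?_getD, List.getElem?_eq_getElem hm, hd]

-- B's counting loop on the suffix drop k yields count + (c - min c k), for any c with
-- date(i) ≤ target ↔ i < c on [0,n)
theorem pvCountB_drop (articles : List (List (String × String))) (target_date : String) (c : Nat)
    (hkey : ∀ a ∈ articles, (a.lookup "date").isSome)
    (hc1 : ∀ i : Nat, (i : Int) < articles.length →
      (pvDateAt articles i ≤ target_date ↔ (i : Int) < c))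
    (hcn : c ≤ articles.length) :
    ∀ (m k : Nat) (count : Int), k ≤ articles.length → articles.length - k = m →
      pvCountB target_date count (articles.drop k) =
        some (count + ((c : Int) - min (c : Int) (k : Int))) := by
  intro m
  induction m with
  | zero =>
    intro k count hk hm
    have hkn : k = articles.length := by omega
    subst hkn
    simp [List.drop_length, pvCountB]
    omega
  | succ m ih =>
    intro k count hk hm
    have hklt : k < articles.length := by omega
    have hdrop : articles.drop k = articles[k] :: articles.drop (k + 1) :=
      List.drop_eq_getElem_cons hklt
    obtain ⟨art, hget, hlk⟩ := pvProbe articles hkey (k : Int) (by omega) (by exact_mod_cast hklt)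
    have hart : art = articles[k] := by
      have := PySem.List.pyGet?_eq_some_getElem (xs := articles) (i := (k : Int))
        (by omega) (by exact_mod_cast hklt)
      rw [this] at hget; exact (Option.some_inj.mp hget).symm
    have hlk' : articles[k].lookup "date" = some (pvDateAt articles k) := by
      rw [← hart]; simpa using hlk
    have hiff := hc1 k (by exact_mod_cast hklt)
    rw [hdrop]
    by_cases hle : pvDateAt articles k ≤ target_date
    · have hkc : (k : Int) < c := hiff.mp hle
      simp only [pvCountB, hlk', if_pos hle]
      rw [ih (k + 1) (count + 1) (by omega) (by omega), Option.some_inj]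
      push_cast; omega
    · have hkc : ¬ ((k : Int) < c) := fun h => hle (hiff.mpr h)
      simp only [pvCountB, hlk', if_neg hle]
      rw [ih (k + 1) count (by omega) (by omega), Option.some_inj]
      push_cast; omega

-- A's loop computes c - 1
theorem pvLoopA_eq (articles : List (List (String × String))) (target_date : String) (c : Int)
    (hkey : ∀ a ∈ articles, (a.lookup "date").isSome)
    (hc1 : ∀ i : Nat, (i : Int) < articles.length →
      (pvDateAt articles i ≤ target_date ↔ (i : Int) < c)) :
    ∀ (fuel : Nat) (left right : Int), 0 ≤ left → right ≤ (articles.length : Int) - 1 →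
      left ≤ right + 1 → c ≤ right + 1 → (left < c ∨ (left = 0 ∧ c = 0)) →
      (right - left + 1).toNat < fuel →
      pvLoopA articles target_date left right fuel = c - 1 := by
  intro fuel
  induction fuel with
  | zero => intro left right _ _ _ _ _ hf; omega
  | succ fuel ih =>
    intro left right hl hrn hlr1 hcr hdisj hf
    by_cases hlr : left ≤ right
    · have hmid := PySem.Int.floordiv_two_mid_bounds (lo := left) (hi := right) hlr
      obtain ⟨art, hget, hlk⟩ := pvProbe articles hkey (PySem.Int.floordiv (left + right) 2)
        (by omega) (by omega)
      have hkey1 : pvDateAt articles (PySem.Int.floordiv (left + right) 2).toNat ≤ target_date ↔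
          PySem.Int.floordiv (left + right) 2 < c := by
        have h := hc1 (PySem.Int.floordiv (left + right) 2).toNat (by omega)
        rwa [Int.toNat_of_nonneg (by omega)] at h
      by_cases hle : pvDateAt articles (PySem.Int.floordiv (left + right) 2).toNat ≤ target_date
      · have hmc : PySem.Int.floordiv (left + right) 2 < c := hkey1.mp hle
        by_cases hlast : PySem.Int.floordiv (left + right) 2 = (articles.length : Int) - 1
        · simp only [pvLoopA, if_pos hlr, hget, hlk, if_pos hle, if_pos hlast]
          omega
        · obtain ⟨art2, hget2, hlk2⟩ := pvProbe articles hkey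
            (PySem.Int.floordiv (left + right) 2 + 1) (by omega) (by omega)
          have hkey2 : pvDateAt articles (PySem.Int.floordiv (left + right) 2 + 1).toNat ≤ target_date ↔
              PySem.Int.floordiv (left + right) 2 + 1 < c := by
            have h := hc1 (PySem.Int.floordiv (left + right) 2 + 1).toNat (by omega)
            rwa [Int.toNat_of_nonneg (by omega)] at h
          by_cases hgt : target_date < pvDateAt articles (PySem.Int.floordiv (left + right) 2 + 1).toNat
          · simp only [pvLoopA, if_pos hlr, hget, hlk, if_pos hle, if_neg hlast, hget2, hlk2,
              if_pos hgt]
            have : ¬ (PySem.Int.floordiv (left + right) 2 + 1 < c) := by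
              rw [← hkey2]; exact not_le.mpr hgt
            omega
          · have hle2 : pvDateAt articles (PySem.Int.floordiv (left + right) 2 + 1).toNat ≤ target_date :=
              not_lt.mp hgt
            simp only [pvLoopA, if_pos hlr, hget, hlk, if_pos hle, if_neg hlast, hget2, hlk2,
              if_neg hgt]
            exact ih _ right (by omega) hrn (by omega) hcr (Or.inl (hkey2.mp hle2)) (by omega)
      · have hmc : ¬ (PySem.Int.floordiv (left + right) 2 < c) := by rw [← hkey1]; exact hle
        simp only [pvLoopA, if_pos hlr, hget, hlk, if_neg hle]
        exact ih left _ hl (by omega) (by omega) (by omega) hdisj (by omega)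
    · simp only [pvLoopA, if_neg hlr]; omega

-- ===== VERDICT (by name: the statement is the Claim_ definition above) =====
theorem binary_search_last_date_spec : Claim_equal_binary_search_last_date := by
  intro articles target_date _ hpre
  obtain ⟨hkey, hsort⟩ := hpre
  have hDg : ∀ (i : Nat) (h : i < articles.length),
      pvDateAt articles i = ((articles[i].lookup "date").getD "") := by
    intro i h
    simp [pvDateAt, List.getD_eq_getElem?_getD, List.getElem?_eq_getElem h]
  have hdown : ∀ i j : Nat, i ≤ j → j < articles.length →
      pvDateAt articles j ≤ target_date → pvDateAt articles i ≤ target_date := by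
    intro i j hij hj hPj
    rcases Nat.eq_or_lt_of_le hij with h | h
    · subst h; exact hPj
    · have hrel := (List.pairwise_iff_getElem.mp hsort) i j (by omega) hj h
      rw [hDg i (by omega), hDg j hj] at *
      exact le_trans (String.le_iff_toList_le.mpr hrel) hPj
  have hex : ∃ k : Nat, k = articles.length ∨ ¬ pvDateAt articles k ≤ target_date :=
    ⟨articles.length, Or.inl rfl⟩
  set c : Nat := Nat.find hex with hcdef
  have hcn : c ≤ articles.length := Nat.find_min' hex (Or.inl rfl)
  have hc1 : ∀ i : Nat, (i : Int) < articles.length →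
      (pvDateAt articles i ≤ target_date ↔ (i : Int) < (c : Int)) := by
    intro i hi
    have hin : i < articles.length := by exact_mod_cast hi
    constructor
    · intro hP
      by_contra hnot
      have hci : c ≤ i := by omega
      rcases Nat.find_spec hex with h | h
      · omega
      · exact h (hdown c i hci hin hP)
    · intro hlt
      have h := Nat.find_min hex (m := i) (by omega)
      push Not at h
      exact h.2
  show _ = _
  unfold binary_search_last_date binary_search_last_date_alt
  have hB := pvCountB_drop articles target_date c hkey hc1 hcn articles.length 0 0 (by omega) (by omega)
  simp only [List.drop_zero] at hB
  rw [hB,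
    pvLoopA_eq articles target_date (c : Int) hkey hc1 _ _ _ (by omega) (by omega)
      (by omega) (by omega) (by omega) (by omega)]
  simp
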